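-- pv_equiv track=rewrite | github.com/mchimento/aoc | 2025/day_09.py | orthogonal_adjacent_edges
-- ===== SOURCE A (Python) =====
-- from collections import defaultdict
--
-- def orthogonal_adjacent_edges(points):
--     edges = set()
--
--     by_x = defaultdict(list)
--     for x, y in points:
--         by_x[x].append((x, y))
--     for x, pts in by_x.items():
--         pts_sorted = sorted(pts, key=lambda p: p[1])
--         for a, b in zip(pts_sorted, pts_sorted[1:]):
--             edges.add((a, b))
--
--     by_y = defaultdict(list)
--     for x, y in points:
--         by_y[y].append((x, y))
--     for y, pts in by_y.items():
--         pts_sorted = sorted(pts, key=lambda p: p[0])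
--         for a, b in zip(pts_sorted, pts_sorted[1:]):
--             edges.add((a, b))
--
--     return list(edges)
-- ===== SOURCE B (Python) =====
-- def _axis_pass(points, coord, other, edges):
--     # distinct coordinate values in first-occurrence order
--     order = []
--     for p in points:
--         if coord(p) not in order:
--             order.append(coord(p))
--     for v in order:
--         prev = None
--         for q in sorted((p for p in points if coord(p) == v), key=other):
--             if prev is not None:
--                 edges.add((prev, q))
--             prev = q
--
-- def orthogonal_adjacent_edges(points):
--     edges = set()
--     _axis_pass(points, lambda p: p[0], lambda p: p[1], edges)
--     _axis_pass(points, lambda p: p[1], lambda p: p[0], edges)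
--     return list(edges)
-- ===== Notes on version B (the rewrite author's own statement) =====
-- stated objective: alternative
-- what changed: Replaces the defaultdict bucket-building and zip-of-shifted-list pairing by a dict-free decomposition: collect the distinct coordinate values in first-occurrence order, re-scan the point list with a filter per distinct value, and pair consecutive sorted points with a prev-accumulator loop.
import Mathlib
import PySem

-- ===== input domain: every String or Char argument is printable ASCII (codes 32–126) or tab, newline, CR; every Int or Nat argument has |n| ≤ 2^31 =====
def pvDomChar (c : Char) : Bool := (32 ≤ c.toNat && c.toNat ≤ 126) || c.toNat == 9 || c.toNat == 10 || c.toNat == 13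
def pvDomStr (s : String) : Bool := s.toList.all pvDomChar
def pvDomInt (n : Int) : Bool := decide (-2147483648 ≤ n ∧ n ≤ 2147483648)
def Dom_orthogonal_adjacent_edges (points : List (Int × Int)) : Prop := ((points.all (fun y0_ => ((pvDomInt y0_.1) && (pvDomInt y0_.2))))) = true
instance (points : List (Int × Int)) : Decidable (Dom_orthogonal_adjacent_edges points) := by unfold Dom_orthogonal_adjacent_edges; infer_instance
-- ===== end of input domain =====

-- B drops the defaultdict grouping and the zip-of-shifted-list pairing: it lists the distinct
-- coordinate values in first-occurrence order, filters the points per value, and pairs consecutive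
-- sorted points with a prev-accumulator (alternative decomposition; not claimed faster).
-- Python's `list(edges)` over a set is ported as the PySem.Set (distinct edges, insertion order).

-- ===== PORT A =====
def orthogonal_adjacent_edges (points : List (Int × Int)) : List ((Int × Int) × (Int × Int)) :=
  let edges : PySem.Set ((Int × Int) × (Int × Int)) := PySem.Set.empty
  let by_x : PySem.Dict Int (List (Int × Int)) :=
    points.foldl (fun d p => d.modify p.1 [] (fun b => b ++ [(p.1, p.2)])) PySem.Dict.empty
  let edges :=
    by_x.items.foldl (fun e kv =>
      let pts_sorted := PySem.List.sorted kv.2 (fun p => p.2) false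
      (pts_sorted.zip (PySem.List.slice pts_sorted (some 1) none)).foldl
        (fun e ab => PySem.Set.add e ab) e) edges
  let by_y : PySem.Dict Int (List (Int × Int)) :=
    points.foldl (fun d p => d.modify p.2 [] (fun b => b ++ [(p.1, p.2)])) PySem.Dict.empty
  let edges :=
    by_y.items.foldl (fun e kv =>
      let pts_sorted := PySem.List.sorted kv.2 (fun p => p.1) false
      (pts_sorted.zip (PySem.List.slice pts_sorted (some 1) none)).foldl
        (fun e ab => PySem.Set.add e ab) e) edges
  edges

-- ===== PORT B =====
-- helper `_axis_pass(points, coord, other, edges)` of Source B, step for step; the inner loop body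
-- ("if prev is not None: edges.add((prev, q)); prev = q") is the named step function pvEdgeStep
def pvEdgeStep (st : PySem.Set ((Int × Int) × (Int × Int)) × Option (Int × Int))
    (q : Int × Int) : PySem.Set ((Int × Int) × (Int × Int)) × Option (Int × Int) :=
  match st.2 with
  | some prev => (PySem.Set.add st.1 (prev, q), some q)
  | none => (st.1, some q)

def pvAxisPass (points : List (Int × Int)) (coord other : (Int × Int) → Int)
    (edges : PySem.Set ((Int × Int) × (Int × Int))) : PySem.Set ((Int × Int) × (Int × Int)) :=
  (points.foldl (fun order p => if coord p ∈ order then order else order ++ [coord p]) []).foldl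
    (fun edges v =>
      ((PySem.List.sorted (points.filter (fun p => coord p == v)) other false).foldl
        pvEdgeStep (edges, none)).1)
    edges

def orthogonal_adjacent_edges_alt (points : List (Int × Int)) : List ((Int × Int) × (Int × Int)) :=
  pvAxisPass points (fun p => p.2) (fun p => p.1)
    (pvAxisPass points (fun p => p.1) (fun p => p.2) PySem.Set.empty)

-- ===== PRECONDITION & SPEC =====
def Spec_orthogonal_adjacent_edges (points : List (Int × Int)) (out : List ((Int × Int) × (Int × Int))) : Prop := out = orthogonal_adjacent_edges_alt points
instance (points : List (Int × Int)) (out : List ((Int × Int) × (Int × Int))) : Decidable (Spec_orthogonal_adjacent_edges points out) := by unfold Spec_orthogonal_adjacent_edges; infer_instance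

-- ===== CLAIM (what is proved, stated in full; the proofs are below) =====
def Claim_equal_orthogonal_adjacent_edges : Prop := ∀ (points : List (Int × Int)), Dom_orthogonal_adjacent_edges points → Spec_orthogonal_adjacent_edges points (orthogonal_adjacent_edges points)

-- ===== LEMMAS AND PROOFS =====

-- proof-only helpers: the grouping dict of A, adjacent pairs
def pvGroupD (f : (Int × Int) → Int) (l : List (Int × Int)) : PySem.Dict Int (List (Int × Int)) :=
  l.foldl (fun d p => d.modify (f p) [] (fun b => b ++ [p])) PySem.Dict.empty

def pvAdj {α : Type} (l : List α) : List (α × α) := l.zip l.tail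

-- ---- Set-fold bookkeeping ----
lemma pv_update_append {α : Type} [BEq α] (s : PySem.Set α) (xs ys : List α) :
    PySem.Set.update s (xs ++ ys) = PySem.Set.update (PySem.Set.update s xs) ys := by
  simp [PySem.Set.update, List.foldl_append]

lemma pv_foldl_update {α β : Type} [BEq α] (L : List β) (h : β → List α) (s : PySem.Set α) :
    L.foldl (fun e b => (h b).foldl (fun e x => PySem.Set.add e x) e) s
      = PySem.Set.update s (L.flatMap h) := by
  induction L generalizing s with
  | nil => simp [PySem.Set.update]
  | cons b L ih =>
    rw [List.foldl_cons, ih, List.flatMap_cons, pv_update_append]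
    rfl

-- ---- the prev-accumulator loop of B is the adjacent-pairs update ----
lemma pv_prev_loop (l : List (Int × Int)) (e : PySem.Set ((Int × Int) × (Int × Int)))
    (a : Int × Int) :
    l.foldl pvEdgeStep (e, some a)
      = (PySem.Set.update e (pvAdj (a :: l)), some (List.getLast (a :: l) (by simp))) := by
  induction l generalizing e a with
  | nil => simp [pvAdj, PySem.Set.update]
  | cons b t ih =>
    rw [List.foldl_cons, show pvEdgeStep (e, some a) b = (PySem.Set.add e (a, b), some b) from rfl,
      ih]
    simp only [Prod.mk.injEq]
    constructor
    · show PySem.Set.update (PySem.Set.add e (a, b)) (pvAdj (b :: t))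
        = PySem.Set.update e (pvAdj (a :: b :: t))
      show _ = PySem.Set.update e ((a, b) :: pvAdj (b :: t))
      simp [PySem.Set.update]
    · simp [List.getLast_cons]

lemma pv_prev_loop_start (l : List (Int × Int)) (e : PySem.Set ((Int × Int) × (Int × Int))) :
    (l.foldl pvEdgeStep (e, none)).1 = PySem.Set.update e (pvAdj l) := by
  cases l with
  | nil => simp [pvAdj, PySem.Set.update]
  | cons a t =>
    rw [List.foldl_cons, show pvEdgeStep (e, none) a = (e, some a) from rfl, pv_prev_loop]

-- ---- first-occurrence order list of B is PySem.List.dedup of the mapped keys ----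
lemma pv_order_eq_dedup_aux (f : (Int × Int) → Int) (l : List (Int × Int)) (acc : List Int) :
    l.foldl (fun order p => if f p ∈ order then order else order ++ [f p]) acc
      = (l.map f).foldl (fun s x => PySem.Set.add s x) acc := by
  induction l generalizing acc with
  | nil => simp
  | cons p l ih =>
    rw [List.foldl_cons, List.map_cons, List.foldl_cons, ih]
    congr 1
    by_cases h : f p ∈ acc
    · simp [PySem.Set.add, PySem.Set.contains, h]
    · simp [PySem.Set.add, PySem.Set.contains, h]

lemma pv_order_eq_dedup (f : (Int × Int) → Int) (l : List (Int × Int)) :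
    l.foldl (fun order p => if f p ∈ order then order else order ++ [f p]) []
      = PySem.List.dedup (l.map f) := by
  rw [pv_order_eq_dedup_aux]
  rfl

-- ---- dedup append step ----
lemma pv_ofList_append {α : Type} [BEq α] [LawfulBEq α] (l : List α) (x : α) :
    PySem.Set.ofList (l ++ [x])
      = if x ∈ l then PySem.Set.ofList l else PySem.Set.ofList l ++ [x] := by
  have hstep : PySem.Set.ofList (l ++ [x]) = PySem.Set.add (PySem.Set.ofList l) x := by
    simp only [PySem.Set.ofList, List.foldl_append, List.foldl_cons, List.foldl_nil]
  rw [hstep]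
  by_cases h : x ∈ l
  · have hx : x ∈ PySem.Set.ofList l := (PySem.Set.mem_ofList l x).mpr h
    simp [PySem.Set.add, PySem.Set.contains, hx, h]
  · have hx : x ∉ PySem.Set.ofList l := fun hc => h ((PySem.Set.mem_ofList l x).mp hc)
    simp [PySem.Set.add, PySem.Set.contains, hx, h]

-- ---- find? helpers ----
lemma pv_find?_map_some (d : List Int) (g : Int → List (Int × Int)) (v : Int)
    (hv : v ∈ d) (hnd : d.Nodup) :
    List.find? (fun q => q.1 == v) (d.map (fun u => (u, g u))) = some (v, g v) := by
  induction d with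
  | nil => simp at hv
  | cons a d ih =>
    by_cases hav : a = v
    · subst hav; simp
    · have hv' : v ∈ d := by
        rcases List.mem_cons.mp hv with h | h
        · exact absurd h.symm hav
        · exact h
      simp only [List.map_cons, List.find?_cons]
      have hne : ((a, g a).1 == v) = false := by simp [hav]
      rw [hne]
      exact ih hv' (List.Nodup.of_cons hnd)

lemma pv_find?_fst_none {γ : Type} (L : List (Int × γ)) (v : Int)
    (hv : v ∉ L.map Prod.fst) :
    List.find? (fun q => q.1 == v) L = none := by
  apply List.find?_eq_none.mpr
  intro q hq
  simp only [beq_iff_eq]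
  intro hqv
  exact hv (by simpa [hqv] using List.mem_map_of_mem (f := Prod.fst) hq)

-- ---- grouping dict characterization ----
lemma pv_group_items (f : (Int × Int) → Int) (l : List (Int × Int)) :
    (pvGroupD f l).items
      = (PySem.List.dedup (l.map f)).map (fun v => (v, l.filter (fun p => f p == v))) := by
  induction l using List.reverseRecOn with
  | nil => rfl
  | append_singleton ys p ih =>
    have hstep : pvGroupD f (ys ++ [p])
        = (pvGroupD f ys).modify (f p) [] (fun b => b ++ [p]) := by
      simp [pvGroupD, List.foldl_append]
    rw [hstep]
    simp only [PySem.Dict.modify]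
    by_cases hm : f p ∈ ys.map f
    · have hfp : f p ∈ PySem.List.dedup (ys.map f) := (PySem.List.mem_dedup _ _).mpr hm
      have hnd := PySem.List.nodup_dedup (ys.map f)
      have hfind : List.find? (fun q => q.1 == f p) (pvGroupD f ys).items
          = some (f p, ys.filter (fun q => f q == f p)) := by
        rw [ih]; exact pv_find?_map_some _ _ _ hfp hnd
      have hget : (pvGroupD f ys).get? (f p) = some (ys.filter (fun q => f q == f p)) := by
        have hdef : (pvGroupD f ys).get? (f p)
            = Option.map (fun x => x.2)
                (List.find? (fun q => q.1 == f p) (pvGroupD f ys).items) := rfl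
        rw [hdef, hfind]; rfl
      have hcont : (pvGroupD f ys).contains (f p) = true := by
        rw [PySem.Dict.contains_eq_isSome_get?, hget]; rfl
      have hgetD : (pvGroupD f ys).getD (f p) [] = ys.filter (fun q => f q == f p) := by
        rw [PySem.Dict.getD_eq_get?_getD, hget]; rfl
      rw [hgetD]
      simp only [PySem.Dict.insert, hcont, if_true]
      have hded : PySem.List.dedup ((ys ++ [p]).map f) = PySem.List.dedup (ys.map f) := by
        rw [List.map_append]; simp [pv_ofList_append, hm]
      rw [hded]
      show ((pvGroupD f ys).items.map _) = _
      rw [ih, List.map_map]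
      apply List.map_congr_left
      intro v hv
      by_cases hvp : v = f p
      · subst hvp
        simp [Function.comp, List.filter_append]
      · have h1 : (v == f p) = false := by simp [hvp]
        have h2 : (f p == v) = false := by simp [Ne.symm hvp]
        simp [Function.comp, h1, h2, List.filter_append]
    · have hnotdd : f p ∉ PySem.List.dedup (ys.map f) :=
        fun h => hm ((PySem.List.mem_dedup _ _).mp h)
      have hfind : List.find? (fun q => q.1 == f p) (pvGroupD f ys).items = none := by
        rw [ih]
        apply pv_find?_fst_none
        have : ((PySem.List.dedup (ys.map f)).map (fun v => (v, ys.filter (fun q => f q == v)))).map Prod.fst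
            = PySem.List.dedup (ys.map f) := by
          rw [List.map_map]; simp [Function.comp_def]
        rw [this]; exact hnotdd
      have hget : (pvGroupD f ys).get? (f p) = none := by
        have hdef : (pvGroupD f ys).get? (f p)
            = Option.map (fun x => x.2)
                (List.find? (fun q => q.1 == f p) (pvGroupD f ys).items) := rfl
        rw [hdef, hfind]; rfl
      have hcont : (pvGroupD f ys).contains (f p) = false := by
        rw [PySem.Dict.contains_eq_isSome_get?, hget]; rfl
      have hgetD : (pvGroupD f ys).getD (f p) [] = [] := by
        rw [PySem.Dict.getD_eq_get?_getD, hget]; rfl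
      rw [hgetD]
      simp only [PySem.Dict.insert, hcont, Bool.false_eq_true, if_false]
      have hded : PySem.List.dedup ((ys ++ [p]).map f)
          = PySem.List.dedup (ys.map f) ++ [f p] := by
        rw [List.map_append]; simp [pv_ofList_append, hm]
      rw [hded, List.map_append]
      show (pvGroupD f ys).items ++ _ = _
      rw [ih]
      congr 1
      · apply List.map_congr_left
        intro v hv
        have hvm : v ∈ ys.map f := (PySem.List.mem_dedup _ _).mp hv
        have h2 : (f p == v) = false := by
          simp only [beq_eq_false_iff_ne, ne_eq]
          intro h; exact hm (h ▸ hvm)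
        simp [h2, List.filter_append]
      · have hfil : ys.filter (fun q => f q == f p) = [] := by
          rw [List.filter_eq_nil_iff]
          intro q hq
          simp only [beq_iff_eq]
          intro h
          exact hm (h ▸ List.mem_map_of_mem hq)
        simp [List.filter_append, hfil]

-- ---- assembling both programs ----
lemma pv_A_eq (points : List (Int × Int)) :
    orthogonal_adjacent_edges points
      = PySem.Set.update
          (PySem.Set.update PySem.Set.empty
            ((pvGroupD Prod.fst points).items.flatMap
              (fun kv => pvAdj (PySem.List.sorted kv.2 (fun p => p.2) false))))
          ((pvGroupD Prod.snd points).items.flatMap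
            (fun kv => pvAdj (PySem.List.sorted kv.2 (fun p => p.1) false))) := by
  simp only [orthogonal_adjacent_edges, PySem.List.slice_from_one]
  rw [pv_foldl_update, pv_foldl_update]
  rfl

lemma pv_axis_pass_eq (points : List (Int × Int)) (coord other : (Int × Int) → Int)
    (e : PySem.Set ((Int × Int) × (Int × Int))) :
    pvAxisPass points coord other e
      = PySem.Set.update e
          ((PySem.List.dedup (points.map coord)).flatMap
            (fun v => pvAdj (PySem.List.sorted (points.filter (fun p => coord p == v))
              other false))) := by
  unfold pvAxisPass
  rw [pv_order_eq_dedup coord points]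
  have hfun : (fun (edges : PySem.Set ((Int × Int) × (Int × Int))) v =>
        ((PySem.List.sorted (points.filter (fun p => coord p == v)) other false).foldl
          pvEdgeStep (edges, none)).1)
      = (fun edges v =>
          ((fun v => pvAdj (PySem.List.sorted (points.filter (fun p => coord p == v))
              other false)) v).foldl (fun e x => PySem.Set.add e x) edges) :=
    funext fun edges => funext fun v => pv_prev_loop_start _ _
  rw [hfun, pv_foldl_update]

-- ===== VERDICT (by name: the statement is the Claim_ definition above) =====
theorem orthogonal_adjacent_edges_spec : Claim_equal_orthogonal_adjacent_edges := by
  intro points _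
  unfold Spec_orthogonal_adjacent_edges
  rw [pv_A_eq]
  unfold orthogonal_adjacent_edges_alt
  rw [pv_axis_pass_eq, pv_axis_pass_eq,
    pv_group_items Prod.fst points, pv_group_items Prod.snd points,
    List.flatMap_map, List.flatMap_map]
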